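-- pv_equiv track=rewrite | github.com/Fritkot/LifeProject | Scripts/Read_Cities_Source_file.py | extraitSousGraphe
-- ===== SOURCE A (Python) =====
-- def triePlusPetiteVille(ville1,ville2):
--     """
--     compare de maniere lexicographique le noms des deux villes
--
--     Paramètres:
--         ville1 : nom de la première ville
--             type : string
--         ville2 : nom de la deuxième ville
--             type : string
--
--     Return : un tuple avec la ville la plus petite d'un point de vu lexicographique en premier
--         type : tuple de 2 strings
--
--
--     exemple :
--         >>> triePlusPetiteVille("Vienna","Brussels")
--         ('Brussels', 'Vienna')
--     """
--     if ville1>ville2 :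
--         return (ville2,ville1)
--     else:
--         return (ville1,ville2)
--
-- def extraitSousGraphe(graphe,listVilles):
--     """
--     extrait un sous-graphe a partir de graphe correspondant a la listVille
--
--     Parametres:
--         graphe : un dictionnaire qui represente un graphe.
--             type : dictionnaire
--         listVille : la liste des villes a extraire
--             type : list
--         return : graphe correspondant a la liste en parametres
--             type : dictionnaire
--     """
--
--     sousGraphe = dict()
--
--     for v1 in listVilles:
--         for v2 in listVilles:
--             if v1 != v2:
--                 villesTriees = triePlusPetiteVille(v1,v2)
--                 if not(villesTriees in sousGraphe.keys()):
--                     sousGraphe[villesTriees] = graphe[villesTriees]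
--
--     return sousGraphe
-- ===== SOURCE B (Python) =====
-- # Faster rewrite: deduplicate the city list first (dict.fromkeys keeps first occurrences in
-- # order), then visit each unordered pair exactly once via a recursive
-- # combinations helper; no membership test on the result dict is needed.
-- def _pairesDeVilles(villes):
--     if not villes:
--         return []
--     premiere, reste = villes[0], villes[1:]
--     return [(premiere, autre) for autre in reste] + _pairesDeVilles(reste)
--
-- def extraitSousGraphe(graphe, listVilles):
--     uniq = list(dict.fromkeys(listVilles))
--     sousGraphe = {}
--     for (a, b) in _pairesDeVilles(uniq):
--         cle = (a, b) if a < b else (b, a)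
--         sousGraphe[cle] = graphe[cle]
--     return sousGraphe
-- ===== Notes on version B (the rewrite author's own statement) =====
-- stated objective: faster
-- what changed: Deduplicates the city list once (dict.fromkeys) and visits each unordered pair exactly once via a recursive combinations helper with a single unconditional dict assignment, replacing A's full n x n double loop with its per-pair membership scan of the result dict's keys.
import Mathlib
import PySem

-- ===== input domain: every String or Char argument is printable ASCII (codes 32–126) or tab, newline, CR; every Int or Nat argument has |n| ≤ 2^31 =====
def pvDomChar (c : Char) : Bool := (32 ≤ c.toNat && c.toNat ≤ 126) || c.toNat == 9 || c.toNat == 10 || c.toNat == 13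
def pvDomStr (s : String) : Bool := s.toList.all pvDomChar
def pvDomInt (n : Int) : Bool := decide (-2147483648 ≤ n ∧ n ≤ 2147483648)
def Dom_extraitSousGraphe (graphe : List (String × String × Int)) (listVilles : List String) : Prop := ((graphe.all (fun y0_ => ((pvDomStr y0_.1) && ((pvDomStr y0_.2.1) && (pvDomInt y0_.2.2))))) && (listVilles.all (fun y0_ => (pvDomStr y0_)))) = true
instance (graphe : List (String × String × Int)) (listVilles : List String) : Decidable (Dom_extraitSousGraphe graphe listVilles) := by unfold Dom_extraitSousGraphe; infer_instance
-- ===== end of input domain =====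

-- B deduplicates the city list once and visits each unordered pair exactly once via a
-- recursive combinations helper, replacing A's full double loop with its per-pair
-- membership test on the result dict (objective: faster, measured).

-- ===== PORT A =====
def triePlusPetiteVille (ville1 ville2 : String) : String × String :=
  if ville2 < ville1 then (ville2, ville1) else (ville1, ville2)

-- shared helper: 'graphe[key]' on the flattened association list (none = KeyError)
def grapheGet? (graphe : List (String × String × Int)) (cle : String × String) : Option Int :=
  match graphe with
  | [] => none
  | (a, b, w) :: reste => if a = cle.1 ∧ b = cle.2 then some w else grapheGet? reste cle

def extraitSousGraphe (graphe : List (String × String × Int)) (listVilles : List String) : List (String × String × Int) :=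
  listVilles.foldl (fun sousGraphe v1 =>
    listVilles.foldl (fun sousGraphe v2 =>
      if v1 ≠ v2 then
        let villesTriees := triePlusPetiteVille v1 v2
        if villesTriees ∈ sousGraphe.map (fun e => (e.1, e.2.1)) then sousGraphe
        else
          match grapheGet? graphe villesTriees with
          | some w => sousGraphe ++ [(villesTriees.1, villesTriees.2, w)]
          | none => sousGraphe          -- Python raises KeyError here; excluded by Pre_
      else sousGraphe) sousGraphe) []

-- ===== PORT B =====
def pairesDeVilles (villes : List String) : List (String × String) :=
  match villes with
  | [] => []
  | premiere :: reste => reste.map (fun autre => (premiere, autre)) ++ pairesDeVilles reste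

def extraitSousGraphe_alt (graphe : List (String × String × Int)) (listVilles : List String) : List (String × String × Int) :=
  let uniq := PySem.List.dedup listVilles   -- list(dict.fromkeys(listVilles))
  (pairesDeVilles uniq).foldl (fun sousGraphe p =>
    let cle := if p.1 < p.2 then (p.1, p.2) else (p.2, p.1)
    match grapheGet? graphe cle with
    | some w => sousGraphe ++ [(cle.1, cle.2, w)]
    | none => sousGraphe) []                -- Python raises KeyError here; excluded by Pre_

-- ===== PRECONDITION & SPEC =====
-- Pre_ excludes exactly the inputs where Python A raises KeyError: some sorted pair of
-- distinct listed cities is not a key of graphe (B raises the same KeyError there).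
def Pre_extraitSousGraphe (graphe : List (String × String × Int)) (listVilles : List String) : Prop :=
  ∀ v1 ∈ listVilles, ∀ v2 ∈ listVilles, v1 ≠ v2 →
    (if v1.toList < v2.toList then (v1, v2) else (v2, v1)) ∈ graphe.map (fun e => (e.1, e.2.1))
instance (graphe : List (String × String × Int)) (listVilles : List String) : Decidable (Pre_extraitSousGraphe graphe listVilles) := by unfold Pre_extraitSousGraphe; infer_instance

def pvWitness_extraitSousGraphe : (List (String × String × Int)) × List String :=
  ([("a", "b", 3), ("a", "c", 5), ("b", "c", 7)], ["b", "a", "c", "a"])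

def Spec_extraitSousGraphe (graphe : List (String × String × Int)) (listVilles : List String) (out : List (String × String × Int)) : Prop := out = extraitSousGraphe_alt graphe listVilles
instance (graphe : List (String × String × Int)) (listVilles : List String) (out : List (String × String × Int)) : Decidable (Spec_extraitSousGraphe graphe listVilles out) := by unfold Spec_extraitSousGraphe; infer_instance

-- ===== CLAIM (what is proved, stated in full; the proofs are below) =====
def Claim_equal_extraitSousGraphe : Prop := ∀ (graphe : List (String × String × Int)) (listVilles : List String), Dom_extraitSousGraphe graphe listVilles → Pre_extraitSousGraphe graphe listVilles → Spec_extraitSousGraphe graphe listVilles (extraitSousGraphe graphe listVilles)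

-- ===== LEMMAS AND PROOFS =====

-- the sorted key of an (ordered) pair, as used by both programs
def tri2 (p : String × String) : String × String := triePlusPetiteVille p.1 p.2

-- one insertion attempt of A: skip if the key is present, else add graphe[key]
def tryAdd (graphe : List (String × String × Int)) (sousGraphe : List (String × String × Int)) (cle : String × String) : List (String × String × Int) :=
  match grapheGet? graphe cle with
  | some w => sousGraphe ++ [(cle.1, cle.2, w)]
  | none => sousGraphe

def insA (graphe : List (String × String × Int)) (sousGraphe : List (String × String × Int)) (cle : String × String) : List (String × String × Int) :=
  if cle ∈ sousGraphe.map (fun e => (e.1, e.2.1)) then sousGraphe else tryAdd graphe sousGraphe cle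

-- the stream of sorted keys A's nested loop processes
def keySeq (l : List String) : List (String × String) :=
  l.flatMap (fun v1 => ((l.filter (fun v2 => decide (v1 ≠ v2))).map (fun v2 => tri2 (v1, v2))))

-- first-occurrence dedup, in a filter-recursion shape convenient for induction
def fd {α : Type} [DecidableEq α] : List α → List α
  | [] => []
  | x :: xs => x :: fd (xs.filter (fun y => decide (¬ x = y)))
termination_by l => l.length
decreasing_by
  simp only [List.length_unattach]
  exact Nat.lt_succ_of_le (le_trans (List.length_filter_le _ _) (by simp))

-- ---- basic facts about tri2 ----
theorem tri2_ite (a b : String) : (if a < b then (a, b) else (b, a)) = tri2 (a, b) := by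
  unfold tri2 triePlusPetiteVille
  rcases lt_trichotomy a b with h | h | h
  · rw [if_pos h, if_neg (not_lt_of_gt h)]
  · subst h; simp
  · rw [if_neg (not_lt_of_gt h), if_pos h]

theorem tri2_swap (a b : String) : tri2 (a, b) = tri2 (b, a) := by
  unfold tri2 triePlusPetiteVille
  rcases lt_trichotomy a b with h | h | h
  · rw [if_neg (not_lt_of_gt h), if_pos h]
  · subst h; rfl
  · rw [if_pos h, if_neg (not_lt_of_gt h)]

theorem tri2_cases (a b : String) : tri2 (a, b) = (a, b) ∨ tri2 (a, b) = (b, a) := by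
  unfold tri2 triePlusPetiteVille
  by_cases h : b < a
  · right; rw [if_pos h]
  · left; rw [if_neg h]

theorem tri2_unord {a b c d : String} (h : tri2 (a, b) = tri2 (c, d)) :
    (a = c ∧ b = d) ∨ (a = d ∧ b = c) := by
  rcases tri2_cases a b with h1 | h1 <;> rcases tri2_cases c d with h2 | h2 <;>
    rw [h1, h2] at h <;> rcases Prod.mk.injEq .. ▸ h with ⟨rfl, rfl⟩
  · left; exact ⟨rfl, rfl⟩
  · right; exact ⟨rfl, rfl⟩
  · right; exact ⟨rfl, rfl⟩
  · left; exact ⟨rfl, rfl⟩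

theorem tri2_inj_right {a y y' : String} (h : tri2 (a, y) = tri2 (a, y')) : y = y' := by
  rcases tri2_unord h with ⟨_, h2⟩ | ⟨h1, h2⟩
  · exact h2
  · rw [h2, ← h1]

-- ---- fd facts ----
theorem fd_nil {α : Type} [DecidableEq α] : fd ([] : List α) = [] := by
  rw [fd]

theorem fd_cons {α : Type} [DecidableEq α] (x : α) (xs : List α) :
    fd (x :: xs) = x :: fd (xs.filter (fun y => decide (¬ x = y))) := by
  rw [fd]

theorem fd_induction {α : Type} [DecidableEq α] (P : List α → Prop)
    (h0 : P ([] : List α))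
    (h1 : ∀ x xs, P (xs.filter (fun y => decide (¬ x = y))) → P (x :: xs)) : ∀ l, P l := by
  intro l
  induction hn : l.length using Nat.strong_induction_on generalizing l with
  | _ n ih =>
    cases l with
    | nil => exact h0
    | cons x xs =>
      refine h1 x xs (ih _ ?_ _ rfl)
      subst hn
      exact Nat.lt_succ_of_le (List.length_filter_le _ _)

theorem mem_fd {α : Type} [DecidableEq α] (l : List α) (a : α) : a ∈ fd l ↔ a ∈ l := by
  induction l using fd_induction with
  | h0 => rw [fd]
  | h1 x xs ih =>
    rw [fd_cons]
    simp only [List.mem_cons, ih, List.mem_filter, decide_eq_true_eq]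
    by_cases h : a = x
    · simp [h]
    · simp [h]
      exact fun _ hx => h hx.symm

theorem nodup_fd {α : Type} [DecidableEq α] (l : List α) : (fd l).Nodup := by
  induction l using fd_induction with
  | h0 => rw [fd]; exact List.nodup_nil
  | h1 x xs ih =>
    rw [fd_cons]
    refine List.nodup_cons.mpr ⟨fun hmem => ?_, ih⟩
    have := (List.mem_filter.mp ((mem_fd _ _).mp hmem)).2
    simp at this

theorem fd_append {α : Type} [DecidableEq α] (a b : List α) :
    fd (a ++ b) = fd a ++ fd (b.filter (fun y => decide (y ∉ a))) := by
  induction a using fd_induction generalizing b with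
  | h0 => simp [fd_nil]
  | h1 x a' ih =>
    rw [List.cons_append, fd_cons, fd_cons, List.filter_append, ih, List.filter_filter]
    have hpred : ∀ y ∈ b,
        (decide (y ∉ List.filter (fun z => decide (¬ x = z)) a') && decide (¬ x = y))
          = decide (y ∉ x :: a') := by
      intro y _
      by_cases hxy : x = y
      · subst hxy; simp
      · simp [List.mem_filter, hxy]
        exact fun _ h => hxy h.symm
    rw [List.filter_congr hpred]
    simp

theorem fd_map_inj {α β : Type} [DecidableEq α] [DecidableEq β] (f : α → β)
    (hf : ∀ x y, f x = f y → x = y) (l : List α) : fd (l.map f) = (fd l).map f := by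
  induction l using fd_induction with
  | h0 => simp [fd_nil]
  | h1 x xs ih =>
    rw [List.map_cons, fd_cons, fd_cons, List.filter_map]
    have hpred : ∀ y ∈ xs,
        ((fun z => decide (¬ f x = z)) ∘ f) y = decide (¬ x = y) := by
      intro y _
      simp only [Function.comp_apply, decide_eq_decide]
      exact not_congr ⟨fun h => hf _ _ h, fun h => h ▸ rfl⟩
    rw [List.filter_congr hpred, ih]
    simp

theorem foldl_setAdd_eq_fd (l acc : List String) :
    l.foldl PySem.Set.add acc = acc ++ fd (l.filter (fun y => decide (y ∉ acc))) := by
  induction l generalizing acc with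
  | nil => simp [fd_nil]
  | cons v l' ih =>
    rw [List.foldl_cons, ih]
    by_cases hv : v ∈ acc
    · have hc : PySem.Set.add acc v = acc := by
        simp [PySem.Set.add, hv]
      rw [hc]
      simp [hv]
    · have hc : PySem.Set.add acc v = acc ++ [v] := by
        simp [PySem.Set.add, hv]
      rw [hc, List.filter_cons]
      simp only [hv, not_false_iff, decide_true, if_pos, fd_cons, List.filter_filter]
      have hpred : ∀ y ∈ l',
          (decide (¬ v = y) && decide (y ∉ acc)) = decide (y ∉ acc ++ [v]) := by
        intro y _
        by_cases hvy : v = y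
        · subst hvy; simp
        · simp [hvy]
          exact fun _ h => hvy h.symm
      rw [List.filter_congr hpred]
      simp

theorem dedup_eq_fd (l : List String) : PySem.List.dedup l = fd l := by
  rw [PySem.List.dedup_eq_ofList, PySem.Set.ofList_eq_foldl, foldl_setAdd_eq_fd]
  simp

-- ---- rewriting both ports into fold-over-keys form ----
theorem foldl_nested {α κ δ : Type} (f : δ → κ → δ) (blk : α → List κ) (l : List α) (s : δ) :
    l.foldl (fun s x => (blk x).foldl f s) s = (l.flatMap blk).foldl f s := by
  induction l generalizing s with
  | nil => rfl
  | cons x l' ih => rw [List.foldl_cons, ih, List.flatMap_cons, List.foldl_append]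

theorem portA_eq_foldl_insA (g : List (String × String × Int)) (l : List String) :
    extraitSousGraphe g l = (keySeq l).foldl (insA g) [] := by
  unfold extraitSousGraphe keySeq
  rw [show (fun (sousGraphe : List (String × String × Int)) (v1 : String) =>
        l.foldl (fun sousGraphe v2 =>
          if v1 ≠ v2 then
            let villesTriees := triePlusPetiteVille v1 v2
            if villesTriees ∈ sousGraphe.map (fun e => (e.1, e.2.1)) then sousGraphe
            else
              match grapheGet? g villesTriees with
              | some w => sousGraphe ++ [(villesTriees.1, villesTriees.2, w)]
              | none => sousGraphe
          else sousGraphe) sousGraphe)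
      = (fun sousGraphe v1 =>
          (((l.filter (fun v2 => decide (v1 ≠ v2))).map (fun v2 => tri2 (v1, v2))).foldl
            (insA g) sousGraphe)) from ?_, foldl_nested]
  · funext sg v1
    show List.foldl (fun sousGraphe v2 =>
        if v1 ≠ v2 then insA g sousGraphe (tri2 (v1, v2)) else sousGraphe) sg l = _
    rw [PySem.List.foldl_ite_eq_foldl_filter (fun v2 => v1 ≠ v2)
          (fun sg v2 => insA g sg (tri2 (v1, v2))), ← List.foldl_map]


theorem portB_eq_foldl_tryAdd (g : List (String × String × Int)) (l : List String) :
    extraitSousGraphe_alt g l = ((pairesDeVilles (fd l)).map tri2).foldl (tryAdd g) [] := by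
  unfold extraitSousGraphe_alt
  rw [dedup_eq_fd, List.foldl_map]
  apply PySem.List.foldl_congr_mem
  intro sg p _
  show (let cle := if p.1 < p.2 then (p.1, p.2) else (p.2, p.1)
        match grapheGet? g cle with
        | some w => sg ++ [(cle.1, cle.2, w)]
        | none => sg) = tryAdd g sg (tri2 p)
  rw [show (if p.1 < p.2 then (p.1, p.2) else (p.2, p.1)) = tri2 p from tri2_ite p.1 p.2]
  rfl

-- ---- duplicate keys in the stream are no-ops for insA ----
theorem keys_tryAdd_sub {g sg : List (String × String × Int)} {k k' : String × String}
    (h : k' ∈ (tryAdd g sg k).map (fun e => (e.1, e.2.1))) :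
    k' ∈ sg.map (fun e => (e.1, e.2.1)) ∨ k' = k := by
  unfold tryAdd at h
  rcases hg : grapheGet? g k with _ | w <;> rw [hg] at h
  · exact Or.inl h
  · rw [List.map_append] at h
    rcases List.mem_append.mp h with h1 | h1
    · exact Or.inl h1
    · simp at h1
      exact Or.inr h1

theorem keys_mono_insA (g sg : List (String × String × Int)) (k k' : String × String)
    (h : k' ∈ sg.map (fun e => (e.1, e.2.1))) :
    k' ∈ (insA g sg k).map (fun e => (e.1, e.2.1)) := by
  unfold insA
  split
  · exact h
  · unfold tryAdd
    rcases hg : grapheGet? g k with _ | w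
    · exact h
    · rw [List.map_append]
      exact List.mem_append.mpr (Or.inl h)

theorem insA_of_mem {g sg : List (String × String × Int)} {k : String × String}
    (h : k ∈ sg.map (fun e => (e.1, e.2.1))) : insA g sg k = sg := by
  rw [insA, if_pos h]

theorem insA_of_not_mem {g sg : List (String × String × Int)} {k : String × String}
    (h : k ∉ sg.map (fun e => (e.1, e.2.1))) : insA g sg k = tryAdd g sg k := by
  rw [insA, if_neg h]

theorem insA_noop_self (g sg : List (String × String × Int)) (k : String × String) :
    insA g (insA g sg k) k = insA g sg k := by
  by_cases hmem : k ∈ sg.map (fun e => (e.1, e.2.1))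
  · rw [insA_of_mem hmem]
    exact insA_of_mem hmem
  · rcases hg : grapheGet? g k with _ | w
    · have h1 : insA g sg k = sg := by
        rw [insA_of_not_mem hmem]
        unfold tryAdd
        rw [hg]
      rw [h1]
      exact h1
    · have h1 : insA g sg k = sg ++ [(k.1, k.2, w)] := by
        rw [insA_of_not_mem hmem]
        unfold tryAdd
        rw [hg]
      have hm2 : k ∈ (sg ++ [(k.1, k.2, w)]).map (fun e => (e.1, e.2.1)) := by simp
      rw [h1, insA_of_mem hm2]

theorem insA_noop_pres {g sg : List (String × String × Int)} {k : String × String}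
    (h : insA g sg k = sg) (k' : String × String) :
    insA g (insA g sg k') k = insA g sg k' := by
  by_cases hmem : k ∈ (insA g sg k').map (fun e => (e.1, e.2.1))
  · rw [insA_of_mem hmem]
  · have hknot : k ∉ sg.map (fun e => (e.1, e.2.1)) :=
      fun hk => hmem (keys_mono_insA g sg k' k hk)
    have hnone : grapheGet? g k = none := by
      rcases hg : grapheGet? g k with _ | w
      · rfl
      · exfalso
        rw [insA_of_not_mem hknot] at h
        unfold tryAdd at h
        rw [hg] at h
        have := congrArg List.length h
        simp at this
    rw [insA_of_not_mem hmem]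
    unfold tryAdd
    rw [hnone]

theorem foldl_insA_filter_noop (g : List (String × String × Int)) (ks : List (String × String))
    (sg : List (String × String × Int)) (k : String × String) (h : insA g sg k = sg) :
    ks.foldl (insA g) sg = (ks.filter (fun y => decide (¬ k = y))).foldl (insA g) sg := by
  induction ks generalizing sg with
  | nil => rfl
  | cons y ks' ih =>
    rw [List.foldl_cons, List.filter_cons]
    by_cases hky : k = y
    · subst hky
      have hcond : ¬ (decide (¬ k = k) = true) := by simp
      rw [if_neg hcond, h]
      exact ih sg h
    · have hcond : decide (¬ k = y) = true := by simp [hky]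
      rw [if_pos hcond, List.foldl_cons]
      exact ih (insA g sg y) (insA_noop_pres h y)

theorem foldl_insA_fd (g : List (String × String × Int)) (ks : List (String × String))
    (sg : List (String × String × Int)) :
    ks.foldl (insA g) sg = (fd ks).foldl (insA g) sg := by
  induction ks using fd_induction generalizing sg with
  | h0 => rw [fd_nil]
  | h1 k ks' ih =>
    rw [fd_cons, List.foldl_cons, List.foldl_cons]
    rw [foldl_insA_filter_noop g ks' (insA g sg k) k (insA_noop_self g sg k)]
    exact ih (insA g sg k)

theorem foldl_insA_eq_tryAdd (g : List (String × String × Int)) (ks : List (String × String))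
    (sg : List (String × String × Int)) (hnd : ks.Nodup)
    (hfresh : ∀ k ∈ ks, k ∉ sg.map (fun e => (e.1, e.2.1))) :
    ks.foldl (insA g) sg = ks.foldl (tryAdd g) sg := by
  induction ks generalizing sg with
  | nil => rfl
  | cons k ks' ih =>
    rw [List.foldl_cons, List.foldl_cons,
        insA_of_not_mem (hfresh k (List.mem_cons_self ..))]
    refine ih (tryAdd g sg k) (List.nodup_cons.mp hnd).2 ?_
    intro k' hk' hk'mem
    rcases keys_tryAdd_sub hk'mem with h1 | h1
    · exact hfresh k' (List.mem_cons_of_mem _ hk') h1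
    · exact (List.nodup_cons.mp hnd).1 (h1 ▸ hk')

-- ---- the key streams coincide after dedup ----
theorem pairesDeVilles_mem {u : List String} {p : String × String} (h : p ∈ pairesDeVilles u) :
    p.1 ∈ u ∧ p.2 ∈ u := by
  induction u with
  | nil => simp [pairesDeVilles] at h
  | cons x xs ih =>
    rw [pairesDeVilles] at h
    rcases List.mem_append.mp h with h1 | h1
    · rcases List.mem_map.mp h1 with ⟨y, hy, rfl⟩
      exact ⟨List.mem_cons_self .., List.mem_cons_of_mem _ hy⟩
    · exact ⟨List.mem_cons_of_mem _ (ih h1).1, List.mem_cons_of_mem _ (ih h1).2⟩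

theorem nodup_map_tri2_paires (u : List String) (hu : u.Nodup) :
    ((pairesDeVilles u).map tri2).Nodup := by
  induction u with
  | nil => simp [pairesDeVilles]
  | cons x xs ih =>
    rcases List.nodup_cons.mp hu with ⟨hx, hxs⟩
    rw [pairesDeVilles, List.map_append, List.map_map]
    refine List.Nodup.append ?_ (ih hxs) ?_
    · exact hxs.map (fun {y y'} h => tri2_inj_right h)
    · intro q hq1 hq2
      rcases List.mem_map.mp hq1 with ⟨y, hy, rfl⟩
      rcases List.mem_map.mp hq2 with ⟨p, hp, hpq⟩
      rcases tri2_unord (Prod.mk.eta ▸ hpq : tri2 (p.1, p.2) = tri2 (x, y)) with ⟨h1, _⟩ | ⟨_, h2⟩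
      · exact hx (h1 ▸ (pairesDeVilles_mem hp).1)
      · exact hx (h2 ▸ (pairesDeVilles_mem hp).2)

theorem flatMap_if_eq_filter_flatMap {α β : Type} (l : List α) (p : α → Bool) (f : α → List β) :
    (l.flatMap (fun a => if p a = true then f a else [])) = (l.filter p).flatMap f := by
  induction l with
  | nil => rfl
  | cons x xs ih =>
    rw [List.flatMap_cons, List.filter_cons]
    by_cases hp : p x = true
    · rw [if_pos hp, if_pos hp, List.flatMap_cons, ih]
    · rw [if_neg hp, if_neg hp, ih, List.nil_append]

theorem fd_keySeq (l : List String) : fd (keySeq l) = (pairesDeVilles (fd l)).map tri2 := by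
  induction l using fd_induction with
  | h0 => simp [keySeq, fd_nil, pairesDeVilles]
  | h1 x xs ih =>
    rw [fd_cons, pairesDeVilles, List.map_append, List.map_map, ← ih]
    unfold keySeq
    rw [List.flatMap_cons]
    have hhead : ((x :: xs).filter (fun v2 => decide (x ≠ v2))).map (fun v2 => tri2 (x, v2))
        = (xs.filter (fun y => decide (¬ x = y))).map (fun y => tri2 (x, y)) := by
      simp
    rw [hhead, fd_append]
    have hB1 : fd ((xs.filter (fun y => decide (¬ x = y))).map (fun y => tri2 (x, y)))
        = (fd (xs.filter (fun y => decide (¬ x = y)))).map (fun y => tri2 (x, y)) :=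
      fd_map_inj _ (fun y y' h => tri2_inj_right h) _
    rw [hB1]
    congr 1
    congr 1
    rw [List.filter_flatMap]
    refine Eq.trans (List.flatMap_congr (g := fun v1 =>
        if decide (¬ x = v1) = true then
          ((xs.filter (fun y => decide (¬ x = y))).filter (fun v2 => decide (v1 ≠ v2))).map
            (fun v2 => tri2 (v1, v2))
        else []) ?_) (by rw [flatMap_if_eq_filter_flatMap])
    intro v1 hv1
    dsimp only
    by_cases hxv1 : x = v1
    · subst hxv1
      rw [if_neg (by simp)]
      refine List.filter_eq_nil_iff.mpr ?_
      intro q hq hqdec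
      rcases List.mem_map.mp hq with ⟨y, hy, rfl⟩
      rcases List.mem_filter.mp hy with ⟨hyin, hyx⟩
      have hyx' : ¬ x = y := by simpa using hyx
      have hyxs : y ∈ xs := by
        rcases List.mem_cons.mp hyin with rfl | h
        · exact absurd rfl hyx'
        · exact h
      have hmem : tri2 (x, y) ∈ (xs.filter (fun y => decide (¬ x = y))).map
          (fun y => tri2 (x, y)) :=
        List.mem_map.mpr ⟨y, List.mem_filter.mpr ⟨hyxs, by simpa using hyx'⟩, rfl⟩
      exact absurd hmem (by simpa using hqdec)
    · rw [if_pos (by simp [hxv1])]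
      have h1 : (x :: xs).filter (fun v2 => decide (v1 ≠ v2))
          = x :: xs.filter (fun v2 => decide (v1 ≠ v2)) := by
        rw [List.filter_cons, if_pos (by simp; exact fun h => hxv1 h.symm)]
      rw [h1, List.map_cons]
      have hheadin : tri2 (v1, x) ∈ (xs.filter (fun y => decide (¬ x = y))).map
          (fun y => tri2 (x, y)) :=
        List.mem_map.mpr ⟨v1, List.mem_filter.mpr ⟨hv1, by simp [hxv1]⟩, tri2_swap x v1⟩
      rw [List.filter_cons, if_neg (by simp; exact ⟨v1, hv1, hxv1, tri2_swap x v1⟩)]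
      rw [List.filter_map, List.filter_filter, List.filter_filter]
      refine congrArg _ (List.filter_congr ?_)
      intro v2 hv2
      by_cases hv2x : v2 = x
      · subst hv2x
        simp
        intro h
        rcases List.mem_map.mp hheadin with ⟨y, hy, heq⟩
        rcases List.mem_filter.mp hy with ⟨hyin, hdec⟩
        exact absurd heq (h y hyin (by simpa using hdec))
      · have hx2 : ¬ x = v2 := fun h => hv2x h.symm
        simp [hx2]
        intro _ y hy hxy heq
        rcases tri2_unord heq with ⟨ha, _⟩ | ⟨ha, _⟩
        · exact hxv1 ha
        · exact hv2x ha.symm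

theorem ports_agree (g : List (String × String × Int)) (l : List String) :
    extraitSousGraphe g l = extraitSousGraphe_alt g l := by
  rw [portA_eq_foldl_insA, portB_eq_foldl_tryAdd, foldl_insA_fd, fd_keySeq]
  exact foldl_insA_eq_tryAdd g _ [] (nodup_map_tri2_paires _ (nodup_fd l)) (by simp)

-- ===== VERDICT (by name: the statement is the Claim_ definition above) =====
theorem extraitSousGraphe_spec : Claim_equal_extraitSousGraphe := by
  intro graphe listVilles _ _
  unfold Spec_extraitSousGraphe
  exact ports_agree graphe listVilles
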